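-- pv_equiv track=rewrite | github.com/yyt6801/for-my-dream | ProgrammingLanguage/python3/png_number_ocr/ocr_number_if_sort.py | check_missing_and_disordered
-- ===== SOURCE A (Python) =====
-- def check_missing_and_disordered(numbers):
--     # 找到最小和最大值
--     min_num = min(numbers)
--     max_num = max(numbers)
--     # 生成完整的数字范围
--     full_range = set(range(min_num, max_num + 1))
--     # 找出缺失的数字
--     missing_numbers = full_range - set(numbers)
--     # 找出顺序颠倒的数字
--     disordered_pairs = []
--     for i in range(len(numbers) - 1):
--         if numbers[i] > numbers[i + 1]:
--             disordered_pairs.append((numbers[i], numbers[i + 1]))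
--     return missing_numbers, disordered_pairs
-- ===== SOURCE B (Python) =====
-- def check_missing_and_disordered(numbers):
--     # sorted distinct values; the missing numbers are exactly the gaps
--     # between consecutive distinct values
--     vals = sorted(set(numbers))
--     missing = set(x for a, b in zip(vals, vals[1:]) for x in range(a + 1, b))
--     disordered = [(a, b) for a, b in zip(numbers, numbers[1:]) if a > b]
--     return missing, disordered
-- ===== Notes on version B (the rewrite author's own statement) =====
-- stated objective: alternative
-- what changed: Missing numbers are computed by sorting the distinct values and collecting the gaps between consecutive values, instead of materialising the whole min..max range as a set and subtracting set(numbers); the disordered pairs come from a zip of the list with its tail instead of an index loop.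
import Mathlib
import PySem

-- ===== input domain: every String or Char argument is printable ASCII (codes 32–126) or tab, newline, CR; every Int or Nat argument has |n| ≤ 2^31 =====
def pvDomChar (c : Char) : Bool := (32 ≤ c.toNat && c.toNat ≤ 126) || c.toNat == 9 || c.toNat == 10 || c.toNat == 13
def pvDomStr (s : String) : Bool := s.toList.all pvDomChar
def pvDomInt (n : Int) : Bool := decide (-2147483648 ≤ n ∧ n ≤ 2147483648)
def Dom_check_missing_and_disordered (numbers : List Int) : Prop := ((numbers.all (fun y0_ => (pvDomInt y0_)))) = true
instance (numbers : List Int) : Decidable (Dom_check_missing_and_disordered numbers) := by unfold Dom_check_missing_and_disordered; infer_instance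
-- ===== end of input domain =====

-- B computes the missing numbers as the gaps between consecutive sorted distinct values
-- instead of subtracting set(numbers) from the full min..max range (alternative decomposition;
-- return-value equivalence on non-empty lists, where A does not raise).

-- ===== PORT A =====
def check_missing_and_disordered (numbers : List Int) : List Int × (List (Int × Int)) :=
  -- min(numbers) / max(numbers); on [] Python raises ValueError (excluded by Pre_), .getD 0 is arbitrary there
  let min_num : Int := (PySem.List.min? numbers (fun x => x)).getD 0
  let max_num : Int := (PySem.List.max? numbers (fun x => x)).getD 0
  let full_range : PySem.Set Int := PySem.Set.ofList (PySem.List.pyRange min_num (max_num + 1) 1)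
  let missing : PySem.Set Int := PySem.Set.diff full_range (PySem.Set.ofList numbers)
  let disordered : List (Int × Int) :=
    (PySem.List.pyRange 0 (PySem.List.len numbers - 1) 1).foldl
      (fun acc i =>
        if PySem.List.pyGetD numbers i 0 > PySem.List.pyGetD numbers (i + 1) 0 then
          acc ++ [(PySem.List.pyGetD numbers i 0, PySem.List.pyGetD numbers (i + 1) 0)]
        else acc) []
  (missing, disordered)

-- ===== PORT B =====
def check_missing_and_disordered_alt (numbers : List Int) : List Int × (List (Int × Int)) :=
  let vals : List Int := PySem.List.sorted (PySem.Set.ofList numbers) (fun x => x) false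
  let missing : PySem.Set Int :=
    PySem.Set.ofList ((vals.zip (vals.drop 1)).flatMap (fun p => PySem.List.pyRange (p.1 + 1) p.2 1))
  let disordered : List (Int × Int) :=
    (numbers.zip (numbers.drop 1)).filter (fun p => decide (p.1 > p.2))
  (missing, disordered)

-- ===== PRECONDITION & SPEC =====
-- Pre_ excludes exactly the empty list, on which A's min() raises ValueError.
def Pre_check_missing_and_disordered (numbers : List Int) : Prop := numbers ≠ []
instance (numbers : List Int) : Decidable (Pre_check_missing_and_disordered numbers) := by unfold Pre_check_missing_and_disordered; infer_instance
def pvWitness_check_missing_and_disordered : List Int := [1, 4, 2]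

def Spec_check_missing_and_disordered (numbers : List Int) (out : List Int × (List (Int × Int))) : Prop := out = check_missing_and_disordered_alt numbers
instance (numbers : List Int) (out : List Int × (List (Int × Int))) : Decidable (Spec_check_missing_and_disordered numbers out) := by unfold Spec_check_missing_and_disordered; infer_instance

-- ===== CLAIM (what is proved, stated in full; the proofs are below) =====
def Claim_equal_check_missing_and_disordered : Prop := ∀ (numbers : List Int), Dom_check_missing_and_disordered numbers → Pre_check_missing_and_disordered numbers → Spec_check_missing_and_disordered numbers (check_missing_and_disordered numbers)

-- ===== LEMMAS AND PROOFS =====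

lemma le_getLast_of_pairwise : ∀ (l : List Int) (h : l ≠ []), l.Pairwise (· < ·) → ∀ x ∈ l, x ≤ l.getLast h := by
  intro l
  induction l with
  | nil => intro h; simp at h
  | cons a t ih =>
    intro _ hp x hx
    cases t with
    | nil => simp at hx; simp [hx]
    | cons b t' =>
      rw [List.getLast_cons (by simp)]
      rcases List.mem_cons.mp hx with rfl | hxt
      · have := (List.pairwise_cons.mp hp).1 _ (List.getLast_mem (by simp))
        omega
      · exact ih (by simp) (List.pairwise_cons.mp hp).2 x hxt

lemma gaps_eq : ∀ (rest : List Int) (a : Int), (a :: rest).Pairwise (· < ·) →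
    (PySem.List.pyRange a ((a :: rest).getLast (by simp) + 1) 1).filter
        (fun x => decide (x ∉ a :: rest))
    = ((a :: rest).zip rest).flatMap (fun p => PySem.List.pyRange (p.1 + 1) p.2 1) := by
  intro rest
  induction rest with
  | nil =>
    intro a _
    simp [PySem.List.pyRange_one_singleton]
  | cons b t ih =>
    intro a hp
    have hab : a < b := (List.pairwise_cons.mp hp).1 b (by simp)
    have hpt : (b :: t).Pairwise (· < ·) := (List.pairwise_cons.mp hp).2
    have hbL : b ≤ (b :: t).getLast (by simp) :=
      le_getLast_of_pairwise _ (by simp) hpt b (by simp)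
    have hLast : (a :: b :: t).getLast (by simp) = (b :: t).getLast (by simp) :=
      List.getLast_cons (by simp)
    rw [hLast]
    rw [PySem.List.pyRange_one_append a b ((b :: t).getLast (by simp) + 1) (by omega) (by omega)]
    rw [PySem.List.pyRange_one_cons hab]
    rw [show (a :: PySem.List.pyRange (a+1) b 1) = [a] ++ PySem.List.pyRange (a+1) b 1 by rfl]
    rw [List.filter_append, List.filter_append]
    have h1 : List.filter (fun x => decide (x ∉ a :: b :: t)) [a] = [] := by simp
    have h2 : List.filter (fun x => decide (x ∉ a :: b :: t)) (PySem.List.pyRange (a+1) b 1)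
        = PySem.List.pyRange (a+1) b 1 := by
      apply List.filter_eq_self.mpr
      intro x hx
      have hxr := (PySem.List.mem_pyRange_one).mp hx
      have hbt : ∀ y ∈ t, b < y := fun y hy => (List.pairwise_cons.mp hpt).1 y hy
      simp only [decide_eq_true_eq, List.mem_cons]
      push Not
      refine ⟨by omega, by omega, fun hy => ?_⟩
      have := hbt x hy; omega
    have h3 : List.filter (fun x => decide (x ∉ a :: b :: t)) (PySem.List.pyRange b ((b :: t).getLast (by simp) + 1) 1)
        = List.filter (fun x => decide (x ∉ b :: t)) (PySem.List.pyRange b ((b :: t).getLast (by simp) + 1) 1) := by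
      apply List.filter_congr
      intro x hx
      have hxr := (PySem.List.mem_pyRange_one).mp hx
      simp only [List.mem_cons, decide_eq_decide]
      constructor
      · intro h; push Not at h ⊢; exact ⟨h.2.1, h.2.2⟩
      · intro h; push Not at h ⊢; exact ⟨by omega, h.1, h.2⟩
    rw [h1, h2, h3, ih b hpt]
    simp [List.flatMap_cons]

lemma missing_eq (numbers : List Int) (hne : numbers ≠ []) :
    PySem.Set.diff
      (PySem.Set.ofList (PySem.List.pyRange ((PySem.List.min? numbers (fun x => x)).getD 0)
        ((PySem.List.max? numbers (fun x => x)).getD 0 + 1) 1))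
      (PySem.Set.ofList numbers)
    = PySem.Set.ofList
        (((PySem.List.sorted (PySem.Set.ofList numbers) (fun x => x) false).zip
          ((PySem.List.sorted (PySem.Set.ofList numbers) (fun x => x) false).drop 1)).flatMap
          (fun p => PySem.List.pyRange (p.1 + 1) p.2 1)) := by
  obtain ⟨m, hm⟩ : ∃ m, PySem.List.min? numbers (fun x => x) = some m := by
    cases h : PySem.List.min? numbers (fun x => x) with
    | none => exact absurd ((PySem.List.min?_eq_none_iff _ _).mp h) hne
    | some m => exact ⟨m, rfl⟩
  obtain ⟨M, hM⟩ : ∃ M, PySem.List.max? numbers (fun x => x) = some M := by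
    cases h : PySem.List.max? numbers (fun x => x) with
    | none => exact absurd ((PySem.List.max?_eq_none_iff _ _).mp h) hne
    | some M => exact ⟨M, rfl⟩
  have hmle : ∀ y ∈ numbers, m ≤ y := PySem.List.min?_isMin hm
  have hMge : ∀ y ∈ numbers, y ≤ M := PySem.List.max?_isMax hM
  rw [hm, hM]
  simp only [Option.getD_some]
  have hvmem : ∀ x, x ∈ PySem.List.sorted (PySem.Set.ofList numbers) (fun x => x) false ↔ x ∈ numbers := by
    intro x
    rw [PySem.List.mem_sorted, PySem.Set.mem_ofList]
  have hvp : (PySem.List.sorted (PySem.Set.ofList numbers) (fun x => x) false).Pairwise (· < ·) :=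
    PySem.List.sorted_ofList_pairwise_lt numbers
  obtain ⟨a, rest, hv⟩ : ∃ a rest, PySem.List.sorted (PySem.Set.ofList numbers) (fun x => x) false = a :: rest := by
    cases h : PySem.List.sorted (PySem.Set.ofList numbers) (fun x => x) false with
    | nil => exact absurd ((hvmem m).mpr (PySem.List.min?_mem hm)) (by simp [h])
    | cons a rest => exact ⟨a, rest, rfl⟩
  rw [hv] at hvp hvmem ⊢
  have ham : a = m := by
    have h1 : m ≤ a := hmle a ((hvmem a).mp (by simp))
    have h2 : a ≤ m := PySem.List.key_head_sorted_le _ _ hv m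
      (PySem.Set.mem_ofList numbers m |>.mpr (PySem.List.min?_mem hm))
    omega
  have hLM : (a :: rest).getLast (by simp) = M := by
    have h1 : (a :: rest).getLast (by simp) ≤ M :=
      hMge _ ((hvmem _).mp (List.getLast_mem (by simp)))
    have h2 : M ≤ (a :: rest).getLast (by simp) :=
      le_getLast_of_pairwise _ (by simp) hvp M ((hvmem M).mpr (PySem.List.max?_mem hM))
    omega
  -- reduce Set.diff to a filter by non-membership in vals
  show List.filter _ _ = _
  have hofl : PySem.Set.ofList (PySem.List.pyRange m (M + 1) 1) = PySem.List.pyRange m (M + 1) 1 :=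
    PySem.Set.ofList_eq_self_of_nodup _ (PySem.List.nodup_pyRange_one m (M+1))
  rw [hofl]
  have hfc : List.filter (fun x => !(PySem.Set.ofList numbers).contains x) (PySem.List.pyRange m (M + 1) 1)
      = List.filter (fun x => decide (x ∉ a :: rest)) (PySem.List.pyRange m (M + 1) 1) := by
    apply List.filter_congr
    intro x _
    simp [PySem.Set.mem_ofList, hvmem x]
  rw [hfc]
  rw [← ham, ← hLM]
  have := gaps_eq rest a hvp
  rw [show ((a :: rest).drop 1) = rest by simp] at *
  rw [this]
  exact (PySem.Set.ofList_eq_self_of_nodup _ (by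
    rw [← this]
    exact (PySem.List.nodup_pyRange_one _ _).filter _)).symm

lemma map_get_pairs (numbers : List Int) :
    (PySem.List.pyRange 0 (PySem.List.len numbers - 1) 1).map
      (fun i => (PySem.List.pyGetD numbers i 0, PySem.List.pyGetD numbers (i + 1) 0))
    = numbers.zip (numbers.drop 1) := by
  apply List.ext_getElem
  · simp [PySem.List.length_pyRange_one, PySem.List.len]
  · intro k h1 h2
    simp only [List.getElem_map, PySem.List.getElem_pyRange_one, List.getElem_zip, List.getElem_drop]
    have hk1 : k + 1 < numbers.length := by
      simp [PySem.List.length_pyRange_one, PySem.List.len] at h1; omega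
    have hk : k < numbers.length := by omega
    rw [show (0 : Int) + k = (k : Int) by ring, show ((k : Int) + 1) = ((k+1 : Nat) : Int) by push_cast; ring]
    rw [PySem.List.pyGetD_natCast, PySem.List.pyGetD_natCast]
    simp [List.getD, hk, hk1, Nat.add_comm]

lemma disordered_eq (numbers : List Int) :
    (PySem.List.pyRange 0 (PySem.List.len numbers - 1) 1).foldl
      (fun acc i =>
        if PySem.List.pyGetD numbers i 0 > PySem.List.pyGetD numbers (i + 1) 0 then
          acc ++ [(PySem.List.pyGetD numbers i 0, PySem.List.pyGetD numbers (i + 1) 0)]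
        else acc) []
    = (numbers.zip (numbers.drop 1)).filter (fun p => decide (p.1 > p.2)) := by
  rw [PySem.List.foldl_append_ite (p := fun i => PySem.List.pyGetD numbers i 0 > PySem.List.pyGetD numbers (i + 1) 0)
      (f := fun i => (PySem.List.pyGetD numbers i 0, PySem.List.pyGetD numbers (i + 1) 0))]
  rw [← map_get_pairs numbers, List.filter_map]
  simp only [Function.comp_def, List.nil_append]

-- ===== VERDICT (by name: the statement is the Claim_ definition above) =====
theorem check_missing_and_disordered_spec : Claim_equal_check_missing_and_disordered := by
  intro numbers _ hne
  unfold Spec_check_missing_and_disordered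
  unfold check_missing_and_disordered check_missing_and_disordered_alt
  exact Prod.ext (missing_eq numbers hne) (disordered_eq numbers)
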